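-- pv_equiv track=rewrite | github.com/ssonje/Edyst-Solutions | Day 3 - European Iteration/Solution.py | calculate
-- ===== SOURCE A (Python) =====
-- listBase = [0,1,2,3,4,5,6,7,8,9,'A','B','C','D','E','F','G','H','I','J','K','L','M','N','O','P','Q','R','S','T','U','V','W','X','Y','Z']
--
-- def NumToRoman(n):
--
--     # logic
--     values = [1000, 900, 500, 400, 100, 90, 50, 40, 10, 9, 5, 4, 1]
--     symbol = ["M", "CM", "D", "CD", "C", "XC", "L", "XL", "X", "IX", "V", "IV", "I"]
--     roman_number = ''
--     i = 0
--     while  n > 0: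
--         for _ in range(n // values[i]):
--             roman_number = roman_number + symbol[i]
--             n -= values[i]
--         i += 1
--     return roman_number
--
-- def findMaxBase(roman):
--
--     # logic
--     max = 0
--     for i in range(len(roman)):
--         for j in range(len(listBase)):
--             if listBase[j]==roman[i] and max<j:
--                 max = j
--
--     return max
--
-- def findIndex(roman_i):
--     for j in range(len(listBase)):
--         if listBase[j]==roman_i:
--             index = j
--
--     return index
--
-- def findNewN(roman,base):
--
--     # calculate the number values from roman
--     i = 0
--     n = 0
--     length = len(roman)
--     while length>0:
--         n += findIndex(roman[i]) * pow(base,length-1)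
--         i += 1
--         length -= 1
--
--     return n
--
-- def calculate(n):
--
--     while True:
--         if n>=1 and n<=3999:
--             roman = NumToRoman(n)
--
--             if len(roman)==1:
--                 base = findIndex(roman)
--             else:
--                 base = findMaxBase(roman)+1
--
--             n_new = findNewN(roman,base)
--
--             n = n_new
--         else:
--             break
--
--     return n
-- ===== SOURCE B (Python) =====
-- listBase = [0,1,2,3,4,5,6,7,8,9,'A','B','C','D','E','F','G','H','I','J','K','L','M','N','O','P','Q','R','S','T','U','V','W','X','Y','Z']
--
-- # index of every letter in listBase (the int entries 0..9 never equal a character)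
-- IDX = {c: j for j, c in enumerate(listBase) if isinstance(c, str)}
--
-- THOUSANDS = ['', 'M', 'MM', 'MMM']
-- HUNDREDS = ['', 'C', 'CC', 'CCC', 'CD', 'D', 'DC', 'DCC', 'DCCC', 'CM']
-- TENS = ['', 'X', 'XX', 'XXX', 'XL', 'L', 'LX', 'LXX', 'LXXX', 'XC']
-- UNITS = ['', 'I', 'II', 'III', 'IV', 'V', 'VI', 'VII', 'VIII', 'IX']
--
-- def NumToRoman(n):
--     # table lookup per decimal digit instead of the greedy subtractive loop
--     return (THOUSANDS[n // 1000] + HUNDREDS[(n // 100) % 10]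
--             + TENS[(n // 10) % 10] + UNITS[n % 10])
--
-- def findNewN(roman, base):
--     # Horner's method instead of the positional pow-sum
--     value = 0
--     for ch in roman:
--         value = value * base + IDX[ch]
--     return value
--
-- def calculate(n):
--     while 1 <= n <= 3999:
--         roman = NumToRoman(n)
--         if len(roman) == 1:
--             base = IDX[roman]
--         else:
--             base = max(IDX[ch] for ch in roman) + 1
--         n = findNewN(roman, base)
--     return n
-- ===== Notes on version B (the rewrite author's own statement) =====
-- stated objective: alternative
-- what changed: NumToRoman's greedy subtractive while-loop is replaced by lookup tables for the thousands/hundreds/tens/units decimal digits, findNewN's positional pow-sum is replaced by Horner's method, and the linear scans of listBase (findIndex, findMaxBase) are replaced by a precomputed char-to-index dict plus a max over the numeral's characters.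
import Mathlib
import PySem

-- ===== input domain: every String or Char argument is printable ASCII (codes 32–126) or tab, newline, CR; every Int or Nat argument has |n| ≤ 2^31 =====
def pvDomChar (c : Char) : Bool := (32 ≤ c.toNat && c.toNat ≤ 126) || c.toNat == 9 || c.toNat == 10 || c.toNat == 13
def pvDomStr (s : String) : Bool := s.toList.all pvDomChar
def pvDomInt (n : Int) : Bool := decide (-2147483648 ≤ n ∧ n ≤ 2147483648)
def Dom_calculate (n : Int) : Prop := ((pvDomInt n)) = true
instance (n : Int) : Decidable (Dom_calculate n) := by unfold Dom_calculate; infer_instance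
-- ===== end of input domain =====

set_option maxRecDepth 4000


-- B replaces the greedy subtractive Roman conversion by four decimal-digit lookup
-- tables and the positional pow-sum by Horner's method with a precomputed index dict
-- (objective: alternative algorithm; same outer reinterpretation loop, identical results).

-- ===== PORT A =====
-- listBase mixes ints 0..9 and letters; the ints never compare equal to a character
-- (Python `0 == 'I'` is False), so they are ported as `none` — exact.
def listBaseA : List (Option Char) :=
  [none, none, none, none, none, none, none, none, none, none,
   some 'A', some 'B', some 'C', some 'D', some 'E', some 'F', some 'G', some 'H',
   some 'I', some 'J', some 'K', some 'L', some 'M', some 'N', some 'O', some 'P',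
   some 'Q', some 'R', some 'S', some 'T', some 'U', some 'V', some 'W', some 'X',
   some 'Y', some 'Z']

def valuesSymbolsA : List (Int × List Char) :=
  [(1000, ['M']), (900, ['C','M']), (500, ['D']), (400, ['C','D']), (100, ['C']),
   (90, ['X','C']), (50, ['L']), (40, ['X','L']), (10, ['X']), (9, ['I','X']),
   (5, ['V']), (4, ['I','V']), (1, ['I'])]

-- while n > 0 with i advancing over values/symbols; for _ in range(n // values[i]): append symbol, subtract value.
-- The [] case (i past the table with n > 0 would raise IndexError in Python) is unreachable for n ≤ 3999.
def ntrGoA : List (Int × List Char) → Int → List Char → List Char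
  | [], _, acc => acc
  | (v, s) :: rest, n, acc =>
      if 0 < n then
        let p := (List.range (PySem.Int.floordiv n v).toNat).foldl
                   (fun (p : List Char × Int) _ => (p.1 ++ s, p.2 - v)) (acc, n)
        ntrGoA rest p.2 p.1
      else acc

def NumToRomanA (n : Int) : List Char := ntrGoA valuesSymbolsA n []

-- for j in range(len(listBase)): if listBase[j]==c: index = j; the initial 0 stands for
-- Python's unset `index` (NameError), unreachable: calculate only looks up Roman letters.
def findIndexA (c : Char) : Int :=
  (PySem.List.enumerate listBaseA).foldl
    (fun idx je => if je.2 == some c then je.1 else idx) 0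

def findMaxBaseA (roman : List Char) : Int :=
  roman.foldl
    (fun mx c =>
      (PySem.List.enumerate listBaseA).foldl
        (fun mx' je => if je.2 == some c && decide (mx' < je.1) then je.1 else mx') mx)
    0

def fnnGoA (base : Int) : List Char → Int → Int → Int
  | [], _, n => n
  | c :: rest, length, n =>
      fnnGoA base rest (length - 1) (n + findIndexA c * base ^ (length - 1).toNat)

def findNewNA (roman : List Char) (base : Int) : Int :=
  fnnGoA base roman (roman.length : Int) 0

-- one pass of the while-True body (roman, base, new n)
def stepA (n : Int) : Int :=
  let roman := NumToRomanA n
  let base : Int :=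
    match roman with
    | [c] => findIndexA c          -- len(roman)==1: findIndex on the whole 1-char string
    | _ => findMaxBaseA roman + 1
  findNewNA roman base

-- while True … break; the fuel only makes the recursion total: the Python loop
-- reinterprets any 1 ≤ n ≤ 3999 out of range within 3 iterations.
def loopA : Nat → Int → Int
  | 0, n => n
  | f + 1, n => if 1 ≤ n ∧ n ≤ 3999 then loopA f (stepA n) else n

def calculate (n : Int) : Int := loopA 8 n

-- ===== PORT B =====
-- IDX = {c: j for j, c in enumerate(listBase) if isinstance(c, str)}
def idxDictB : PySem.Dict Char Int := PySem.Dict.ofList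
  [('A',10),('B',11),('C',12),('D',13),('E',14),('F',15),('G',16),('H',17),('I',18),
   ('J',19),('K',20),('L',21),('M',22),('N',23),('O',24),('P',25),('Q',26),('R',27),
   ('S',28),('T',29),('U',30),('V',31),('W',32),('X',33),('Y',34),('Z',35)]

-- IDX[c]; the KeyError default 0 is never taken (only Roman letters are looked up)
def idxB (c : Char) : Int := (PySem.Dict.get? idxDictB c).getD 0

def thousandsB : List (List Char) := [[], ['M'], ['M','M'], ['M','M','M']]
def hundredsB : List (List Char) :=
  [[], ['C'], ['C','C'], ['C','C','C'], ['C','D'], ['D'], ['D','C'], ['D','C','C'],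
   ['D','C','C','C'], ['C','M']]
def tensB : List (List Char) :=
  [[], ['X'], ['X','X'], ['X','X','X'], ['X','L'], ['L'], ['L','X'], ['L','X','X'],
   ['L','X','X','X'], ['X','C']]
def unitsB : List (List Char) :=
  [[], ['I'], ['I','I'], ['I','I','I'], ['I','V'], ['V'], ['V','I'], ['V','I','I'],
   ['V','I','I','I'], ['I','X']]

-- table lookup per decimal digit; indices are in range for 1 ≤ n ≤ 3999, getD [] never taken
def NumToRomanB (n : Int) : List Char :=
  (PySem.List.pyGet? thousandsB (PySem.Int.floordiv n 1000)).getD []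
  ++ (PySem.List.pyGet? hundredsB (PySem.Int.mod (PySem.Int.floordiv n 100) 10)).getD []
  ++ (PySem.List.pyGet? tensB (PySem.Int.mod (PySem.Int.floordiv n 10) 10)).getD []
  ++ (PySem.List.pyGet? unitsB (PySem.Int.mod n 10)).getD []

-- Horner: value = value*base + IDX[ch]
def findNewNB (roman : List Char) (base : Int) : Int :=
  roman.foldl (fun v c => v * base + idxB c) 0

def stepB (n : Int) : Int :=
  let roman := NumToRomanB n
  let base : Int :=
    match roman with
    | [c] => idxB c                                                    -- IDX[roman]
    | _ => (PySem.List.max? (roman.map idxB) (fun x => x)).getD 0 + 1  -- max(IDX[ch] for ch in roman) + 1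
  findNewNB roman base

def loopB : Nat → Int → Int
  | 0, n => n
  | f + 1, n => if 1 ≤ n ∧ n ≤ 3999 then loopB f (stepB n) else n

def calculate_alt (n : Int) : Int := loopB 8 n

-- ===== PRECONDITION & SPEC =====
def Spec_calculate (n : Int) (out : Int) : Prop := out = calculate_alt n
instance (n : Int) (out : Int) : Decidable (Spec_calculate n out) := by unfold Spec_calculate; infer_instance

-- ===== CLAIM (what is proved, stated in full; the proofs are below) =====
def Claim_equal_calculate : Prop := ∀ (n : Int), Dom_calculate n → Spec_calculate n (calculate n)

-- ===== LEMMAS AND PROOFS =====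

-- A's greedy loop, recast over Int ediv/emod --------------------------------

def romanD : List (Int × List Char) → Int → List Char
  | [], _ => []
  | (v, s) :: rest, n => (List.replicate (n / v).toNat s).flatten ++ romanD rest (n % v)

theorem innerFold (v : Int) (s : List Char) :
    ∀ (k : Nat) (acc : List Char) (n : Int),
      (List.range k).foldl (fun (p : List Char × Int) _ => (p.1 ++ s, p.2 - v)) (acc, n)
        = (acc ++ (List.replicate k s).flatten, n - k * v) := by
  intro k
  induction k with
  | zero => intro acc n; simp
  | succ k ih =>
      intro acc n
      rw [List.range_succ, List.foldl_append, ih]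
      simp [List.replicate_succ' (n := k), mul_comm]
      ring

theorem romanD_zero : ∀ l : List (Int × List Char), romanD l 0 = [] := by
  intro l
  induction l with
  | nil => rfl
  | cons p rest ih => cases p with | mk v s => simp [romanD, ih]

theorem ntrGoA_eq : ∀ (l : List (Int × List Char)) (n : Int) (acc : List Char),
    0 ≤ n → (∀ p ∈ l, 0 < p.1) → ntrGoA l n acc = acc ++ romanD l n := by
  intro l
  induction l with
  | nil => intro n acc _ _; simp [ntrGoA, romanD]
  | cons p rest ih =>
      intro n acc hn hpos
      cases p with
      | mk v s =>
        have hv : 0 < v := hpos (v, s) (List.mem_cons_self ..)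
        by_cases h : 0 < n
        · have hfd : PySem.Int.floordiv n v = n / v :=
            PySem.Int.floordiv_eq_ediv_of_pos hv
          have hq : 0 ≤ n / v := Int.ediv_nonneg hn hv.le
          have hqc : ((n / v).toNat : Int) = n / v := Int.toNat_of_nonneg hq
          have hmod : n - ((n / v).toNat : Int) * v = n % v := by
            rw [hqc, Int.emod_def]
            ring
          simp only [ntrGoA, if_pos h, hfd, innerFold, hmod]
          rw [ih (n % v) _ (Int.emod_nonneg n (ne_of_gt hv))
                (fun q hq' => hpos q (List.mem_cons_of_mem _ hq'))]
          simp [romanD]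
        · have hn0 : n = 0 := by omega
          subst hn0
          simp [ntrGoA, romanD_zero]

theorem romanD_append : ∀ (l1 l2 : List (Int × List Char)) (n : Int),
    romanD (l1 ++ l2) n
      = romanD l1 n ++ romanD l2 (l1.foldl (fun m p => m % p.1) n) := by
  intro l1
  induction l1 with
  | nil => intro l2 n; simp [romanD]
  | cons p rest ih =>
      intro l2 n
      cases p with
      | mk v s => simp [romanD, ih, List.foldl_cons]

-- the four greedy segments of A's value table
def segM : List (Int × List Char) := [(1000, ['M'])]
def segC : List (Int × List Char) := [(900, ['C','M']), (500, ['D']), (400, ['C','D']), (100, ['C'])]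
def segX : List (Int × List Char) := [(90, ['X','C']), (50, ['L']), (40, ['X','L']), (10, ['X'])]
def segI : List (Int × List Char) := [(9, ['I','X']), (5, ['V']), (4, ['I','V']), (1, ['I'])]

theorem vs_split : valuesSymbolsA = segM ++ (segC ++ (segX ++ segI)) := rfl

theorem segM_eq (n d : Int) (h0 : 0 ≤ n) (h1 : n ≤ 3999) (hd : n / 1000 = d) :
    romanD segM n = (PySem.List.pyGet? thousandsB d).getD [] := by
  have hb0 : 0 ≤ d := by omega
  have hb1 : d < 4 := by omega
  interval_cases d
  · simp only [segM, romanD, hd]; decide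
  · simp only [segM, romanD, hd]; decide
  · simp only [segM, romanD, hd]; decide
  · simp only [segM, romanD, hd]; decide
theorem segC_eq (r d : Int) (h0 : 0 ≤ r) (h1 : r < 1000) (hd : r / 100 = d) :
    romanD segC r = (PySem.List.pyGet? hundredsB d).getD [] := by
  have hb0 : 0 ≤ d := by omega
  have hb1 : d < 10 := by omega
  interval_cases d
  · have e1 : r / 900 = 0 := by omega
    have e2 : r % 900 / 500 = 0 := by omega
    have e3 : r % 900 % 500 / 400 = 0 := by omega
    have e4 : r % 900 % 500 % 400 / 100 = 0 := by omega
    simp only [segC, romanD, e1, e2, e3, e4]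
    decide
  · have e1 : r / 900 = 0 := by omega
    have e2 : r % 900 / 500 = 0 := by omega
    have e3 : r % 900 % 500 / 400 = 0 := by omega
    have e4 : r % 900 % 500 % 400 / 100 = 1 := by omega
    simp only [segC, romanD, e1, e2, e3, e4]
    decide
  · have e1 : r / 900 = 0 := by omega
    have e2 : r % 900 / 500 = 0 := by omega
    have e3 : r % 900 % 500 / 400 = 0 := by omega
    have e4 : r % 900 % 500 % 400 / 100 = 2 := by omega
    simp only [segC, romanD, e1, e2, e3, e4]
    decide
  · have e1 : r / 900 = 0 := by omega
    have e2 : r % 900 / 500 = 0 := by omega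
    have e3 : r % 900 % 500 / 400 = 0 := by omega
    have e4 : r % 900 % 500 % 400 / 100 = 3 := by omega
    simp only [segC, romanD, e1, e2, e3, e4]
    decide
  · have e1 : r / 900 = 0 := by omega
    have e2 : r % 900 / 500 = 0 := by omega
    have e3 : r % 900 % 500 / 400 = 1 := by omega
    have e4 : r % 900 % 500 % 400 / 100 = 0 := by omega
    simp only [segC, romanD, e1, e2, e3, e4]
    decide
  · have e1 : r / 900 = 0 := by omega
    have e2 : r % 900 / 500 = 1 := by omega
    have e3 : r % 900 % 500 / 400 = 0 := by omega
    have e4 : r % 900 % 500 % 400 / 100 = 0 := by omega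
    simp only [segC, romanD, e1, e2, e3, e4]
    decide
  · have e1 : r / 900 = 0 := by omega
    have e2 : r % 900 / 500 = 1 := by omega
    have e3 : r % 900 % 500 / 400 = 0 := by omega
    have e4 : r % 900 % 500 % 400 / 100 = 1 := by omega
    simp only [segC, romanD, e1, e2, e3, e4]
    decide
  · have e1 : r / 900 = 0 := by omega
    have e2 : r % 900 / 500 = 1 := by omega
    have e3 : r % 900 % 500 / 400 = 0 := by omega
    have e4 : r % 900 % 500 % 400 / 100 = 2 := by omega
    simp only [segC, romanD, e1, e2, e3, e4]
    decide
  · have e1 : r / 900 = 0 := by omega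
    have e2 : r % 900 / 500 = 1 := by omega
    have e3 : r % 900 % 500 / 400 = 0 := by omega
    have e4 : r % 900 % 500 % 400 / 100 = 3 := by omega
    simp only [segC, romanD, e1, e2, e3, e4]
    decide
  · have e1 : r / 900 = 1 := by omega
    have e2 : r % 900 / 500 = 0 := by omega
    have e3 : r % 900 % 500 / 400 = 0 := by omega
    have e4 : r % 900 % 500 % 400 / 100 = 0 := by omega
    simp only [segC, romanD, e1, e2, e3, e4]
    decide
theorem segX_eq (r d : Int) (h0 : 0 ≤ r) (h1 : r < 100) (hd : r / 10 = d) :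
    romanD segX r = (PySem.List.pyGet? tensB d).getD [] := by
  have hb0 : 0 ≤ d := by omega
  have hb1 : d < 10 := by omega
  interval_cases d
  · have e1 : r / 90 = 0 := by omega
    have e2 : r % 90 / 50 = 0 := by omega
    have e3 : r % 90 % 50 / 40 = 0 := by omega
    have e4 : r % 90 % 50 % 40 / 10 = 0 := by omega
    simp only [segX, romanD, e1, e2, e3, e4]
    decide
  · have e1 : r / 90 = 0 := by omega
    have e2 : r % 90 / 50 = 0 := by omega
    have e3 : r % 90 % 50 / 40 = 0 := by omega
    have e4 : r % 90 % 50 % 40 / 10 = 1 := by omega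
    simp only [segX, romanD, e1, e2, e3, e4]
    decide
  · have e1 : r / 90 = 0 := by omega
    have e2 : r % 90 / 50 = 0 := by omega
    have e3 : r % 90 % 50 / 40 = 0 := by omega
    have e4 : r % 90 % 50 % 40 / 10 = 2 := by omega
    simp only [segX, romanD, e1, e2, e3, e4]
    decide
  · have e1 : r / 90 = 0 := by omega
    have e2 : r % 90 / 50 = 0 := by omega
    have e3 : r % 90 % 50 / 40 = 0 := by omega
    have e4 : r % 90 % 50 % 40 / 10 = 3 := by omega
    simp only [segX, romanD, e1, e2, e3, e4]
    decide
  · have e1 : r / 90 = 0 := by omega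
    have e2 : r % 90 / 50 = 0 := by omega
    have e3 : r % 90 % 50 / 40 = 1 := by omega
    have e4 : r % 90 % 50 % 40 / 10 = 0 := by omega
    simp only [segX, romanD, e1, e2, e3, e4]
    decide
  · have e1 : r / 90 = 0 := by omega
    have e2 : r % 90 / 50 = 1 := by omega
    have e3 : r % 90 % 50 / 40 = 0 := by omega
    have e4 : r % 90 % 50 % 40 / 10 = 0 := by omega
    simp only [segX, romanD, e1, e2, e3, e4]
    decide
  · have e1 : r / 90 = 0 := by omega
    have e2 : r % 90 / 50 = 1 := by omega
    have e3 : r % 90 % 50 / 40 = 0 := by omega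
    have e4 : r % 90 % 50 % 40 / 10 = 1 := by omega
    simp only [segX, romanD, e1, e2, e3, e4]
    decide
  · have e1 : r / 90 = 0 := by omega
    have e2 : r % 90 / 50 = 1 := by omega
    have e3 : r % 90 % 50 / 40 = 0 := by omega
    have e4 : r % 90 % 50 % 40 / 10 = 2 := by omega
    simp only [segX, romanD, e1, e2, e3, e4]
    decide
  · have e1 : r / 90 = 0 := by omega
    have e2 : r % 90 / 50 = 1 := by omega
    have e3 : r % 90 % 50 / 40 = 0 := by omega
    have e4 : r % 90 % 50 % 40 / 10 = 3 := by omega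
    simp only [segX, romanD, e1, e2, e3, e4]
    decide
  · have e1 : r / 90 = 1 := by omega
    have e2 : r % 90 / 50 = 0 := by omega
    have e3 : r % 90 % 50 / 40 = 0 := by omega
    have e4 : r % 90 % 50 % 40 / 10 = 0 := by omega
    simp only [segX, romanD, e1, e2, e3, e4]
    decide
theorem segI_eq (r d : Int) (h0 : 0 ≤ r) (h1 : r < 10) (hd : r / 1 = d) :
    romanD segI r = (PySem.List.pyGet? unitsB d).getD [] := by
  have hb0 : 0 ≤ d := by omega
  have hb1 : d < 10 := by omega
  interval_cases d
  · have e1 : r / 9 = 0 := by omega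
    have e2 : r % 9 / 5 = 0 := by omega
    have e3 : r % 9 % 5 / 4 = 0 := by omega
    have e4 : r % 9 % 5 % 4 / 1 = 0 := by omega
    simp only [segI, romanD, e1, e2, e3, e4]
    decide
  · have e1 : r / 9 = 0 := by omega
    have e2 : r % 9 / 5 = 0 := by omega
    have e3 : r % 9 % 5 / 4 = 0 := by omega
    have e4 : r % 9 % 5 % 4 / 1 = 1 := by omega
    simp only [segI, romanD, e1, e2, e3, e4]
    decide
  · have e1 : r / 9 = 0 := by omega
    have e2 : r % 9 / 5 = 0 := by omega
    have e3 : r % 9 % 5 / 4 = 0 := by omega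
    have e4 : r % 9 % 5 % 4 / 1 = 2 := by omega
    simp only [segI, romanD, e1, e2, e3, e4]
    decide
  · have e1 : r / 9 = 0 := by omega
    have e2 : r % 9 / 5 = 0 := by omega
    have e3 : r % 9 % 5 / 4 = 0 := by omega
    have e4 : r % 9 % 5 % 4 / 1 = 3 := by omega
    simp only [segI, romanD, e1, e2, e3, e4]
    decide
  · have e1 : r / 9 = 0 := by omega
    have e2 : r % 9 / 5 = 0 := by omega
    have e3 : r % 9 % 5 / 4 = 1 := by omega
    have e4 : r % 9 % 5 % 4 / 1 = 0 := by omega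
    simp only [segI, romanD, e1, e2, e3, e4]
    decide
  · have e1 : r / 9 = 0 := by omega
    have e2 : r % 9 / 5 = 1 := by omega
    have e3 : r % 9 % 5 / 4 = 0 := by omega
    have e4 : r % 9 % 5 % 4 / 1 = 0 := by omega
    simp only [segI, romanD, e1, e2, e3, e4]
    decide
  · have e1 : r / 9 = 0 := by omega
    have e2 : r % 9 / 5 = 1 := by omega
    have e3 : r % 9 % 5 / 4 = 0 := by omega
    have e4 : r % 9 % 5 % 4 / 1 = 1 := by omega
    simp only [segI, romanD, e1, e2, e3, e4]
    decide
  · have e1 : r / 9 = 0 := by omega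
    have e2 : r % 9 / 5 = 1 := by omega
    have e3 : r % 9 % 5 / 4 = 0 := by omega
    have e4 : r % 9 % 5 % 4 / 1 = 2 := by omega
    simp only [segI, romanD, e1, e2, e3, e4]
    decide
  · have e1 : r / 9 = 0 := by omega
    have e2 : r % 9 / 5 = 1 := by omega
    have e3 : r % 9 % 5 / 4 = 0 := by omega
    have e4 : r % 9 % 5 % 4 / 1 = 3 := by omega
    simp only [segI, romanD, e1, e2, e3, e4]
    decide
  · have e1 : r / 9 = 1 := by omega
    have e2 : r % 9 / 5 = 0 := by omega
    have e3 : r % 9 % 5 / 4 = 0 := by omega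
    have e4 : r % 9 % 5 % 4 / 1 = 0 := by omega
    simp only [segI, romanD, e1, e2, e3, e4]
    decide

theorem NumToRoman_eq (n : Int) (h1 : 1 ≤ n) (h2 : n ≤ 3999) :
    NumToRomanA n = NumToRomanB n := by
  have hpos : ∀ p ∈ valuesSymbolsA, 0 < p.1 := by
    intro p hp
    have hb : (valuesSymbolsA.all fun p => decide (0 < p.1)) = true := by rfl
    simpa using List.all_eq_true.mp hb p hp
  have hA : NumToRomanA n = romanD valuesSymbolsA n :=
    ntrGoA_eq valuesSymbolsA n [] (by omega) hpos
  rw [hA, vs_split, romanD_append, romanD_append, romanD_append]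
  have c1 : List.foldl (fun m p => m % p.1) n segM = n % 1000 := by
    simp [segM]
  have c2 : List.foldl (fun m p => m % p.1) (n % 1000) segC = n % 100 := by
    simp [segC]; try omega
  have c3 : List.foldl (fun m p => m % p.1) (n % 100) segX = n % 10 := by
    simp [segX]; try omega
  rw [c1, c2, c3]
  have hfd1 : PySem.Int.floordiv n 1000 = n / 1000 :=
    PySem.Int.floordiv_eq_ediv_of_pos (by norm_num)
  have hfd2 : PySem.Int.mod (PySem.Int.floordiv n 100) 10 = (n % 1000) / 100 := by
    rw [PySem.Int.floordiv_eq_ediv_of_pos (by norm_num),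
        PySem.Int.mod_eq_emod_of_pos (by norm_num)]
    omega
  have hfd3 : PySem.Int.mod (PySem.Int.floordiv n 10) 10 = (n % 100) / 10 := by
    rw [PySem.Int.floordiv_eq_ediv_of_pos (by norm_num),
        PySem.Int.mod_eq_emod_of_pos (by norm_num)]
    omega
  have hfd4 : PySem.Int.mod n 10 = (n % 10) / 1 := by
    rw [PySem.Int.mod_eq_emod_of_pos (by norm_num)]
    omega
  rw [NumToRomanB, hfd1, hfd2, hfd3, hfd4,
      segM_eq n (n / 1000) (by omega) h2 rfl,
      segC_eq (n % 1000) ((n % 1000) / 100) (by omega) (by omega) rfl,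
      segX_eq (n % 100) ((n % 100) / 10) (by omega) (by omega) rfl,
      segI_eq (n % 10) ((n % 10) / 1) (by omega) (by omega) rfl]
  try simp [List.append_assoc]

-- which characters a table-built Roman numeral can contain -------------------

def romanLetters : List Char := ['I', 'V', 'X', 'L', 'C', 'D', 'M']

theorem mem_getD_table (t : List (List Char)) (i : Int)
    (hT : (t.all fun l => l.all fun x => romanLetters.contains x) = true) :
    ∀ c ∈ (PySem.List.pyGet? t i).getD [], c ∈ romanLetters := by
  intro c hc
  cases h : PySem.List.pyGet? t i with
  | none => rw [h] at hc; simp at hc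
  | some l =>
      rw [h] at hc
      have h1 := List.all_eq_true.mp hT l (PySem.List.mem_of_pyGet?_eq_some _ h)
      have h2 := List.all_eq_true.mp h1 c hc
      simpa using h2

theorem mem_NumToRomanB (n : Int) : ∀ c ∈ NumToRomanB n, c ∈ romanLetters := by
  intro c hc
  unfold NumToRomanB at hc
  simp only [List.mem_append] at hc
  rcases hc with ((h | h) | h) | h
  · exact mem_getD_table thousandsB _ (by rfl) c h
  · exact mem_getD_table hundredsB _ (by rfl) c h
  · exact mem_getD_table tensB _ (by rfl) c h
  · exact mem_getD_table unitsB _ (by rfl) c h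

-- index lookups agree on Roman letters ---------------------------------------

theorem idx_eq (c : Char) (h : c ∈ romanLetters) : findIndexA c = idxB c := by
  fin_cases h <;> decide

theorem idx_lb (c : Char) (h : c ∈ romanLetters) : 10 ≤ idxB c := by
  fin_cases h <;> decide

theorem idxI : idxB 'I' = 18 := by decide
theorem idxV : idxB 'V' = 31 := by decide
theorem idxX : idxB 'X' = 33 := by decide
theorem idxL : idxB 'L' = 21 := by decide
theorem idxC : idxB 'C' = 12 := by decide
theorem idxD : idxB 'D' = 13 := by decide
theorem idxM : idxB 'M' = 22 := by decide

def preI : List (Int × Option Char) := [(0, none), (1, none), (2, none), (3, none), (4, none), (5, none), (6, none), (7, none), (8, none), (9, none), (10, some 'A'), (11, some 'B'), (12, some 'C'), (13, some 'D'), (14, some 'E'), (15, some 'F'), (16, some 'G'), (17, some 'H')]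
def postI : List (Int × Option Char) := [(19, some 'J'), (20, some 'K'), (21, some 'L'), (22, some 'M'), (23, some 'N'), (24, some 'O'), (25, some 'P'), (26, some 'Q'), (27, some 'R'), (28, some 'S'), (29, some 'T'), (30, some 'U'), (31, some 'V'), (32, some 'W'), (33, some 'X'), (34, some 'Y'), (35, some 'Z')]
def preV : List (Int × Option Char) := [(0, none), (1, none), (2, none), (3, none), (4, none), (5, none), (6, none), (7, none), (8, none), (9, none), (10, some 'A'), (11, some 'B'), (12, some 'C'), (13, some 'D'), (14, some 'E'), (15, some 'F'), (16, some 'G'), (17, some 'H'), (18, some 'I'), (19, some 'J'), (20, some 'K'), (21, some 'L'), (22, some 'M'), (23, some 'N'), (24, some 'O'), (25, some 'P'), (26, some 'Q'), (27, some 'R'), (28, some 'S'), (29, some 'T'), (30, some 'U')]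
def postV : List (Int × Option Char) := [(32, some 'W'), (33, some 'X'), (34, some 'Y'), (35, some 'Z')]
def preX : List (Int × Option Char) := [(0, none), (1, none), (2, none), (3, none), (4, none), (5, none), (6, none), (7, none), (8, none), (9, none), (10, some 'A'), (11, some 'B'), (12, some 'C'), (13, some 'D'), (14, some 'E'), (15, some 'F'), (16, some 'G'), (17, some 'H'), (18, some 'I'), (19, some 'J'), (20, some 'K'), (21, some 'L'), (22, some 'M'), (23, some 'N'), (24, some 'O'), (25, some 'P'), (26, some 'Q'), (27, some 'R'), (28, some 'S'), (29, some 'T'), (30, some 'U'), (31, some 'V'), (32, some 'W')]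
def postX : List (Int × Option Char) := [(34, some 'Y'), (35, some 'Z')]
def preL : List (Int × Option Char) := [(0, none), (1, none), (2, none), (3, none), (4, none), (5, none), (6, none), (7, none), (8, none), (9, none), (10, some 'A'), (11, some 'B'), (12, some 'C'), (13, some 'D'), (14, some 'E'), (15, some 'F'), (16, some 'G'), (17, some 'H'), (18, some 'I'), (19, some 'J'), (20, some 'K')]
def postL : List (Int × Option Char) := [(22, some 'M'), (23, some 'N'), (24, some 'O'), (25, some 'P'), (26, some 'Q'), (27, some 'R'), (28, some 'S'), (29, some 'T'), (30, some 'U'), (31, some 'V'), (32, some 'W'), (33, some 'X'), (34, some 'Y'), (35, some 'Z')]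
def preC : List (Int × Option Char) := [(0, none), (1, none), (2, none), (3, none), (4, none), (5, none), (6, none), (7, none), (8, none), (9, none), (10, some 'A'), (11, some 'B')]
def postC : List (Int × Option Char) := [(13, some 'D'), (14, some 'E'), (15, some 'F'), (16, some 'G'), (17, some 'H'), (18, some 'I'), (19, some 'J'), (20, some 'K'), (21, some 'L'), (22, some 'M'), (23, some 'N'), (24, some 'O'), (25, some 'P'), (26, some 'Q'), (27, some 'R'), (28, some 'S'), (29, some 'T'), (30, some 'U'), (31, some 'V'), (32, some 'W'), (33, some 'X'), (34, some 'Y'), (35, some 'Z')]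
def preD : List (Int × Option Char) := [(0, none), (1, none), (2, none), (3, none), (4, none), (5, none), (6, none), (7, none), (8, none), (9, none), (10, some 'A'), (11, some 'B'), (12, some 'C')]
def postD : List (Int × Option Char) := [(14, some 'E'), (15, some 'F'), (16, some 'G'), (17, some 'H'), (18, some 'I'), (19, some 'J'), (20, some 'K'), (21, some 'L'), (22, some 'M'), (23, some 'N'), (24, some 'O'), (25, some 'P'), (26, some 'Q'), (27, some 'R'), (28, some 'S'), (29, some 'T'), (30, some 'U'), (31, some 'V'), (32, some 'W'), (33, some 'X'), (34, some 'Y'), (35, some 'Z')]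
def preM : List (Int × Option Char) := [(0, none), (1, none), (2, none), (3, none), (4, none), (5, none), (6, none), (7, none), (8, none), (9, none), (10, some 'A'), (11, some 'B'), (12, some 'C'), (13, some 'D'), (14, some 'E'), (15, some 'F'), (16, some 'G'), (17, some 'H'), (18, some 'I'), (19, some 'J'), (20, some 'K'), (21, some 'L')]
def postM : List (Int × Option Char) := [(23, some 'N'), (24, some 'O'), (25, some 'P'), (26, some 'Q'), (27, some 'R'), (28, some 'S'), (29, some 'T'), (30, some 'U'), (31, some 'V'), (32, some 'W'), (33, some 'X'), (34, some 'Y'), (35, some 'Z')]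


theorem fold_no_match (c : Char) : ∀ (es : List (Int × Option Char)) (mx : Int),
    (es.all fun je => !(je.2 == some c)) = true →
    es.foldl (fun mx' je => if je.2 == some c && decide (mx' < je.1) then je.1 else mx') mx = mx := by
  intro es
  induction es with
  | nil => intro mx _; rfl
  | cons je rest ih =>
      intro mx h
      rw [List.all_cons, Bool.and_eq_true] at h
      have hne : (je.2 == some c) = false := by
        have := h.1; simp only [Bool.not_eq_eq_eq_not, Bool.not_true] at this
        simpa using this
      simp only [List.foldl_cons, hne, Bool.false_and, Bool.false_eq_true, reduceIte]
      exact ih mx h.2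

theorem fold_eval (c : Char) (pre post : List (Int × Option Char)) (j : Int)
    (hpre : (pre.all fun je => !(je.2 == some c)) = true)
    (hpost : (post.all fun je => !(je.2 == some c)) = true) (mx : Int) :
    (pre ++ (j, some c) :: post).foldl
        (fun mx' je => if je.2 == some c && decide (mx' < je.1) then je.1 else mx') mx
      = max mx j := by
  rw [List.foldl_append, fold_no_match c pre mx hpre, List.foldl_cons]
  by_cases hmx : mx < j
  · simp only [beq_self_eq_true, Bool.true_and, hmx, decide_true, if_pos]
    rw [fold_no_match c post j hpost]
    omega
  · simp only [beq_self_eq_true, Bool.true_and, hmx, decide_false,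
      Bool.false_eq_true, reduceIte]
    rw [fold_no_match c post mx hpost]
    omega

theorem inner_eq (c : Char) (h : c ∈ romanLetters) (mx : Int) :
    (PySem.List.enumerate listBaseA).foldl
        (fun mx' je => if je.2 == some c && decide (mx' < je.1) then je.1 else mx') mx
      = max mx (idxB c) := by
  fin_cases h
  · rw [idxI, show PySem.List.enumerate listBaseA = preI ++ ((18 : Int), some 'I') :: postI from by decide]
    exact fold_eval 'I' preI postI 18 (by rfl) (by rfl) mx
  · rw [idxV, show PySem.List.enumerate listBaseA = preV ++ ((31 : Int), some 'V') :: postV from by decide]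
    exact fold_eval 'V' preV postV 31 (by rfl) (by rfl) mx
  · rw [idxX, show PySem.List.enumerate listBaseA = preX ++ ((33 : Int), some 'X') :: postX from by decide]
    exact fold_eval 'X' preX postX 33 (by rfl) (by rfl) mx
  · rw [idxL, show PySem.List.enumerate listBaseA = preL ++ ((21 : Int), some 'L') :: postL from by decide]
    exact fold_eval 'L' preL postL 21 (by rfl) (by rfl) mx
  · rw [idxC, show PySem.List.enumerate listBaseA = preC ++ ((12 : Int), some 'C') :: postC from by decide]
    exact fold_eval 'C' preC postC 12 (by rfl) (by rfl) mx
  · rw [idxD, show PySem.List.enumerate listBaseA = preD ++ ((13 : Int), some 'D') :: postD from by decide]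
    exact fold_eval 'D' preD postD 13 (by rfl) (by rfl) mx
  · rw [idxM, show PySem.List.enumerate listBaseA = preM ++ ((22 : Int), some 'M') :: postM from by decide]
    exact fold_eval 'M' preM postM 22 (by rfl) (by rfl) mx

theorem findMaxBaseA_eq (roman : List Char) (hm : ∀ c ∈ roman, c ∈ romanLetters) :
    findMaxBaseA roman = roman.foldl (fun mx c => max mx (idxB c)) 0 := by
  unfold findMaxBaseA
  suffices h : ∀ (l : List Char), (∀ c ∈ l, c ∈ romanLetters) → ∀ mx : Int,
      l.foldl (fun mx c =>
        (PySem.List.enumerate listBaseA).foldl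
          (fun mx' je => if je.2 == some c && decide (mx' < je.1) then je.1 else mx') mx) mx
        = l.foldl (fun mx c => max mx (idxB c)) mx by
    exact h roman hm 0
  intro l
  induction l with
  | nil => intro _ mx; rfl
  | cons c rest ih =>
      intro hmem mx
      simp only [List.foldl_cons]
      rw [inner_eq c (hmem c (List.mem_cons_self ..)) mx]
      exact ih (fun x hx => hmem x (List.mem_cons_of_mem _ hx)) _

theorem maxB_eq (roman : List Char) (hm : ∀ c ∈ roman, c ∈ romanLetters) :
    (PySem.List.max? (roman.map idxB) (fun x => x)).getD 0
      = roman.foldl (fun mx c => max mx (idxB c)) 0 := by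
  cases roman with
  | nil => rfl
  | cons c rest =>
      rw [List.map_cons, PySem.List.max?_id_cons]
      simp only [Option.getD_some, List.foldl_cons, List.foldl_map]
      have h10 : 10 ≤ idxB c := idx_lb c (hm c (List.mem_cons_self ..))
      have : max 0 (idxB c) = idxB c := max_eq_right (by omega)
      rw [this]

-- Horner vs positional pow-sum -----------------------------------------------

theorem horner_shift (b : Int) : ∀ (l : List Char) (v : Int),
    l.foldl (fun v c => v * b + idxB c) v
      = v * b ^ l.length + l.foldl (fun v c => v * b + idxB c) 0 := by
  intro l
  induction l with
  | nil => intro v; simp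
  | cons c rest ih =>
      intro v
      simp only [List.foldl_cons, List.length_cons]
      rw [ih (v * b + idxB c), ih (0 * b + idxB c)]
      ring

theorem fnnGoA_eq (b : Int) : ∀ (l : List Char) (n : Int),
    (∀ c ∈ l, c ∈ romanLetters) →
    fnnGoA b l (l.length : Int) n = n + l.foldl (fun v c => v * b + idxB c) 0 := by
  intro l
  induction l with
  | nil => intro n _; simp [fnnGoA]
  | cons c rest ih =>
      intro n hmem
      have hlen : ((c :: rest).length : Int) - 1 = (rest.length : Int) := by
        simp
      simp only [fnnGoA, hlen, Int.toNat_natCast]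
      rw [ih _ (fun x hx => hmem x (List.mem_cons_of_mem _ hx))]
      rw [List.foldl_cons, horner_shift b rest (0 * b + idxB c)]
      rw [idx_eq c (hmem c (List.mem_cons_self ..))]
      ring

theorem findNewN_eq (roman : List Char) (hm : ∀ c ∈ roman, c ∈ romanLetters)
    (b : Int) : findNewNA roman b = findNewNB roman b := by
  unfold findNewNA findNewNB
  rw [fnnGoA_eq b roman 0 hm]
  ring

-- one loop iteration agrees ---------------------------------------------------

theorem step_eq (n : Int) (h1 : 1 ≤ n) (h2 : n ≤ 3999) : stepA n = stepB n := by
  unfold stepA stepB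
  rw [NumToRoman_eq n h1 h2]
  have hm := mem_NumToRomanB n
  generalize hR : NumToRomanB n = R at *
  match R with
  | [] =>
      show findNewNA [] (findMaxBaseA [] + 1)
          = findNewNB [] ((PySem.List.max? (([] : List Char).map idxB) (fun x => x)).getD 0 + 1)
      rfl
  | [c] =>
      show findNewNA [c] (findIndexA c) = findNewNB [c] (idxB c)
      rw [idx_eq c (hm c (List.mem_cons_self ..))]
      exact findNewN_eq [c] hm _
  | c1 :: c2 :: rest =>
      show findNewNA (c1 :: c2 :: rest) (findMaxBaseA (c1 :: c2 :: rest) + 1)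
          = findNewNB (c1 :: c2 :: rest)
              ((PySem.List.max? ((c1 :: c2 :: rest).map idxB) (fun x => x)).getD 0 + 1)
      rw [findMaxBaseA_eq _ hm, maxB_eq _ hm]
      exact findNewN_eq (c1 :: c2 :: rest) hm _

theorem loop_eq : ∀ (f : Nat) (n : Int), loopA f n = loopB f n := by
  intro f
  induction f with
  | zero => intro n; rfl
  | succ f ih =>
      intro n
      simp only [loopA, loopB]
      split
      · next h => rw [step_eq n h.1 h.2]; exact ih _
      · rfl

-- ===== VERDICT (by name: the statement is the Claim_ definition above) =====
theorem calculate_spec : Claim_equal_calculate := by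
  intro n _
  unfold Spec_calculate calculate calculate_alt
  exact loop_eq 8 n
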